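-- pv_equiv track=rewrite | github.com/AnanyaSharma18/DYSCRIBB | audiocheck.py | adjust_bbox_all_text
-- ===== SOURCE A (Python) =====
-- def adjust_bbox_all_text(bboxes, img_shape, expansion_pixels=5):
--     min_x = min(bbox[0][0] for bbox in bboxes)
--     min_y = min(bbox[0][1] for bbox in bboxes)
--     max_x = max(bbox[2][0] for bbox in bboxes)
--     max_y = max(bbox[2][1] for bbox in bboxes)
--
--     top_left = max(0, min_x - expansion_pixels), max(0, min_y - expansion_pixels)
--     bottom_right = min(img_shape[1], max_x + expansion_pixels), min(img_shape[0], max_y + expansion_pixels)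
--
--     return top_left, bottom_right
-- ===== SOURCE B (Python) =====
-- def adjust_bbox_all_text(bboxes, img_shape, expansion_pixels=5):
--     # Compute each text box's own expanded region, clamped to the image,
--     # then take the union of those regions. This equals A's result because
--     # the clamps max(0, .) and min(bound, .) are monotone, so they commute
--     # with min/max over the boxes.
--     regions = [((max(0, b[0][0] - expansion_pixels), max(0, b[0][1] - expansion_pixels)),
--                 (min(img_shape[1], b[2][0] + expansion_pixels), min(img_shape[0], b[2][1] + expansion_pixels)))
--                for b in bboxes]
--     (tlx, tly), (brx, bry) = regions[0]
--     for (x0, y0), (x1, y1) in regions[1:]: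
--         if x0 < tlx:
--             tlx = x0
--         if y0 < tly:
--             tly = y0
--         if brx < x1:
--             brx = x1
--         if bry < y1:
--             bry = y1
--     return ((tlx, tly), (brx, bry))
-- ===== Notes on version B (the rewrite author's own statement) =====
-- stated objective: alternative
-- what changed: Instead of A's merge-then-clamp (global min/max of raw corners, then one expansion/clamp), B clamps first: it maps every box to its own expanded region clamped to the image and then unions those regions componentwise; correct because the clamps are monotone and commute with min/max.
import Mathlib
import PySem

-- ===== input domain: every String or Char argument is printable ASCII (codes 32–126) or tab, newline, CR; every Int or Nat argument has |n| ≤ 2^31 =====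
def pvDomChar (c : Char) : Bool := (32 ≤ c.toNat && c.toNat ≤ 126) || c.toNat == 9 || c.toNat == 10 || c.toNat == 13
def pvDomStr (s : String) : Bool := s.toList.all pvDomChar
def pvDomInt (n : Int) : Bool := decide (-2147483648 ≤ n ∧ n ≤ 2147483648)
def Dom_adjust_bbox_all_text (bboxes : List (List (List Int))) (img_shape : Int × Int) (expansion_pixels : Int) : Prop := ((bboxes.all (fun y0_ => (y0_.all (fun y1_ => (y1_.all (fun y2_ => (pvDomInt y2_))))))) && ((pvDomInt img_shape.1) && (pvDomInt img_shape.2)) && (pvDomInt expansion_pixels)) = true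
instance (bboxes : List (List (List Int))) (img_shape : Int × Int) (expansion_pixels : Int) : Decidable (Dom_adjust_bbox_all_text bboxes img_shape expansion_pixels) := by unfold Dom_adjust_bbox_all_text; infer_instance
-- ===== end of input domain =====

-- B clamps first and merges after: each box is mapped to its own expanded region clamped to the
-- image, and those regions are unioned componentwise (A clamps once after a global min/max);
-- objective: alternative algorithm, same cost.

-- ===== PORT A =====
-- bbox[i][j] → pyGetD; Pre_ guarantees the indices are in range so the defaults are never used.
def adjust_bbox_all_text (bboxes : List (List (List Int))) (img_shape : Int × Int) (expansion_pixels : Int) : (Int × Int) × (Int × Int) :=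
  let min_x := (PySem.List.min? (bboxes.map (fun bbox => PySem.List.pyGetD (PySem.List.pyGetD bbox 0 []) 0 0)) (fun x => x)).getD 0
  let min_y := (PySem.List.min? (bboxes.map (fun bbox => PySem.List.pyGetD (PySem.List.pyGetD bbox 0 []) 1 0)) (fun x => x)).getD 0
  let max_x := (PySem.List.max? (bboxes.map (fun bbox => PySem.List.pyGetD (PySem.List.pyGetD bbox 2 []) 0 0)) (fun x => x)).getD 0
  let max_y := (PySem.List.max? (bboxes.map (fun bbox => PySem.List.pyGetD (PySem.List.pyGetD bbox 2 []) 1 0)) (fun x => x)).getD 0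
  let top_left := (max 0 (min_x - expansion_pixels), max 0 (min_y - expansion_pixels))
  let bottom_right := (min img_shape.2 (max_x + expansion_pixels), min img_shape.1 (max_y + expansion_pixels))
  (top_left, bottom_right)

-- ===== PORT B =====
-- per-box expanded region, clamped to the image (Python B's comprehension body)
def pvRegion (img_shape : Int × Int) (expansion_pixels : Int) (b : List (List Int)) : (Int × Int) × (Int × Int) :=
  ((max 0 (PySem.List.pyGetD (PySem.List.pyGetD b 0 []) 0 0 - expansion_pixels),
    max 0 (PySem.List.pyGetD (PySem.List.pyGetD b 0 []) 1 0 - expansion_pixels)),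
   (min img_shape.2 (PySem.List.pyGetD (PySem.List.pyGetD b 2 []) 0 0 + expansion_pixels),
    min img_shape.1 (PySem.List.pyGetD (PySem.List.pyGetD b 2 []) 1 0 + expansion_pixels)))

def adjust_bbox_all_text_alt (bboxes : List (List (List Int))) (img_shape : Int × Int) (expansion_pixels : Int) : (Int × Int) × (Int × Int) :=
  let regions := bboxes.map (pvRegion img_shape expansion_pixels)
  match regions with
  | [] => ((0, 0), (0, 0))   -- Python B raises IndexError here; outside Pre_
  | r0 :: rest =>
    let s := rest.foldl (fun (s : Int × Int × Int × Int) r =>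
      (if r.1.1 < s.1 then r.1.1 else s.1,
       if r.1.2 < s.2.1 then r.1.2 else s.2.1,
       if s.2.2.1 < r.2.1 then r.2.1 else s.2.2.1,
       if s.2.2.2 < r.2.2 then r.2.2 else s.2.2.2))
      (r0.1.1, r0.1.2, r0.2.1, r0.2.2)
    ((s.1, s.2.1), (s.2.2.1, s.2.2.2))

-- ===== PRECONDITION & SPEC =====
-- Pre_ excludes exactly the inputs where Python A raises: empty bboxes (ValueError from min())
-- and malformed boxes lacking index 2 or coordinates 0/1 (IndexError).
def Pre_adjust_bbox_all_text (bboxes : List (List (List Int))) (img_shape : Int × Int) (expansion_pixels : Int) : Prop :=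
  bboxes ≠ [] ∧ ∀ b ∈ bboxes, 3 ≤ b.length ∧ 2 ≤ (b.getD 0 []).length ∧ 2 ≤ (b.getD 2 []).length
instance (bboxes : List (List (List Int))) (img_shape : Int × Int) (expansion_pixels : Int) : Decidable (Pre_adjust_bbox_all_text bboxes img_shape expansion_pixels) := by unfold Pre_adjust_bbox_all_text; infer_instance

def pvWitness_adjust_bbox_all_text : List (List (List Int)) × (Int × Int) × Int :=
  ([[[1, 2], [9, 2], [9, 8], [1, 8]], [[0, 3], [7, 3], [7, 9], [0, 9]]], (20, 30), 5)

def Spec_adjust_bbox_all_text (bboxes : List (List (List Int))) (img_shape : Int × Int) (expansion_pixels : Int) (out : (Int × Int) × (Int × Int)) : Prop := out = adjust_bbox_all_text_alt bboxes img_shape expansion_pixels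
instance (bboxes : List (List (List Int))) (img_shape : Int × Int) (expansion_pixels : Int) (out : (Int × Int) × (Int × Int)) : Decidable (Spec_adjust_bbox_all_text bboxes img_shape expansion_pixels out) := by unfold Spec_adjust_bbox_all_text; infer_instance

-- ===== CLAIM =====
def Claim_equal_adjust_bbox_all_text : Prop := ∀ (bboxes : List (List (List Int))) (img_shape : Int × Int) (expansion_pixels : Int), Dom_adjust_bbox_all_text bboxes img_shape expansion_pixels → Pre_adjust_bbox_all_text bboxes img_shape expansion_pixels → Spec_adjust_bbox_all_text bboxes img_shape expansion_pixels (adjust_bbox_all_text bboxes img_shape expansion_pixels)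

-- ===== LEMMAS AND PROOFS =====

-- The whole of B's fused fold over clamped regions equals the clamp of A's four min/max folds:
-- the clamps max 0 (· - e) and min M (· + e) are monotone, so they commute with running min/max.
theorem clamp_fold (rest : List (List (List Int))) (g1 g2 g3 g4 : List (List Int) → Int)
    (M1 M2 e a b c d : Int) :
    rest.foldl (fun (x : Int × Int × Int × Int) y =>
      (if max 0 (g1 y - e) < x.1 then max 0 (g1 y - e) else x.1,
       if max 0 (g2 y - e) < x.2.1 then max 0 (g2 y - e) else x.2.1,
       if x.2.2.1 < min M2 (g3 y + e) then min M2 (g3 y + e) else x.2.2.1,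
       if x.2.2.2 < min M1 (g4 y + e) then min M1 (g4 y + e) else x.2.2.2))
      (max 0 (a - e), max 0 (b - e), min M2 (c + e), min M1 (d + e))
    = (max 0 (rest.foldl (fun x y => min x (g1 y)) a - e),
       max 0 (rest.foldl (fun x y => min x (g2 y)) b - e),
       min M2 (rest.foldl (fun x y => max x (g3 y)) c + e),
       min M1 (rest.foldl (fun x y => max x (g4 y)) d + e)) := by
  induction rest generalizing a b c d with
  | nil => rfl
  | cons x t ih =>
    simp only [List.foldl]
    have h1 : (if max 0 (g1 x - e) < max 0 (a - e) then max 0 (g1 x - e) else max 0 (a - e))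
        = max 0 (min a (g1 x) - e) := by split_ifs <;> omega
    have h2 : (if max 0 (g2 x - e) < max 0 (b - e) then max 0 (g2 x - e) else max 0 (b - e))
        = max 0 (min b (g2 x) - e) := by split_ifs <;> omega
    have h3 : (if min M2 (c + e) < min M2 (g3 x + e) then min M2 (g3 x + e) else min M2 (c + e))
        = min M2 (max c (g3 x) + e) := by split_ifs <;> omega
    have h4 : (if min M1 (d + e) < min M1 (g4 x + e) then min M1 (g4 x + e) else min M1 (d + e))
        = min M1 (max d (g4 x) + e) := by split_ifs <;> omega
    rw [h1, h2, h3, h4, ih]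

theorem adjust_bbox_all_text_spec : Claim_equal_adjust_bbox_all_text := by
  intro bboxes img_shape expansion_pixels _ hpre
  unfold Spec_adjust_bbox_all_text
  obtain ⟨hne, -⟩ := hpre
  match bboxes with
  | [] => exact absurd rfl hne
  | first :: rest =>
    simp only [adjust_bbox_all_text, adjust_bbox_all_text_alt, List.map_cons,
      PySem.List.min?_id_cons, PySem.List.max?_id_cons, Option.getD_some,
      List.foldl_map, pvRegion]
    rw [clamp_fold rest
      (fun y => PySem.List.pyGetD (PySem.List.pyGetD y 0 []) 0 0)
      (fun y => PySem.List.pyGetD (PySem.List.pyGetD y 0 []) 1 0)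
      (fun y => PySem.List.pyGetD (PySem.List.pyGetD y 2 []) 0 0)
      (fun y => PySem.List.pyGetD (PySem.List.pyGetD y 2 []) 1 0)
      img_shape.1 img_shape.2 expansion_pixels]
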